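-- pv_equiv track=rewrite | github.com/Shilenkovv/Algorithms_training_6.0_by_Yandex | week02/e.py | del_medians
-- ===== SOURCE A (Python) =====
-- def del_medians(nums):
--     nums = sorted(nums)
--     ans = [0] * len(nums)
--     odd = True if len(nums) % 2 else False
--     i = 0
--     while len(nums) > 1:
--         idx = len(nums) // 2
--         if not odd:
--             idx -= 1
--         ans[i] = nums[idx]
--         nums.pop(idx)
--         i += 1
--         odd = not odd
--     ans[-1] = nums[0]
--     return ans
-- ===== SOURCE B (Python) =====
-- def del_medians(nums):
--     s = sorted(nums)
--     n = len(s)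
--     c = (n - 1) // 2
--     left = s[:c][::-1]
--     right = s[c + 1:]
--     out = [s[c]]
--     a, b = (left, right) if n % 2 else (right, left)
--     for x, y in zip(a, b):
--         out.append(x)
--         out.append(y)
--     out.extend(a[len(b):])
--     return out
-- ===== Notes on version B (the rewrite author's own statement) =====
-- stated objective: faster
-- what changed: A simulates the process, popping the median out of the shrinking sorted list n-1 times (each pop shifts the tail); B sorts once and emits the provably identical output order in closed form: the centre element, then the left half reversed interleaved with the right half (left first for odd length, right first for even).
import Mathlib
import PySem

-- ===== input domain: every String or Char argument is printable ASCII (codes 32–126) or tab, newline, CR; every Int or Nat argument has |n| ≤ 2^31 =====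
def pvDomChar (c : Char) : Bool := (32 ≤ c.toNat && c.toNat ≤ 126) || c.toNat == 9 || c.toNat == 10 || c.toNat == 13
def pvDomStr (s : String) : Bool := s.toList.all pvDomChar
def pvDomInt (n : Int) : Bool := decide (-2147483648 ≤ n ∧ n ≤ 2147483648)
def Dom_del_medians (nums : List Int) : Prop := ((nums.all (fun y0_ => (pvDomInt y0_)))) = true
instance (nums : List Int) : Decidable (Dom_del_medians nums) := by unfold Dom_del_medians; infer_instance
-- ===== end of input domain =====

-- B replaces A's quadratic pop-the-median loop by the closed-form output order
-- (centre element, then interleave the left half reversed with the right half); return values only, no mutation observable.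

-- ===== PORT A =====
-- the while loop: state (nums, ans, i, odd); nums.pop(idx) is exact as getD + eraseIdx since 0 ≤ idx < len(nums) whenever len(nums) > 1
def del_medians_loopA (nums ans : List Int) (i : Nat) (odd : Bool) : List Int × List Int :=
  if h : 1 < nums.length then
    let idx := if odd then nums.length / 2 else nums.length / 2 - 1
    del_medians_loopA (nums.eraseIdx idx) (ans.set i (nums.getD idx 0)) (i + 1) (!odd)
  else (nums, ans)
termination_by nums.length
decreasing_by
  have hidx : (if odd then nums.length / 2 else nums.length / 2 - 1) < nums.length := by
    split <;> omega
  simp [List.length_eraseIdx, hidx]; omega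

def del_medians (nums : List Int) : List Int :=
  let s := PySem.List.sorted nums (fun x => x) false
  let r := del_medians_loopA s (List.replicate s.length 0) 0 (s.length % 2 == 1)
  -- ans[-1] = nums[0]: Python raises IndexError when nums = [] (excluded by Pre_)
  PySem.List.pySetD r.2 (-1) (PySem.List.pyGetD r.1 0 0)

-- ===== PORT B =====
def del_medians_alt (nums : List Int) : List Int :=
  let s := PySem.List.sorted nums (fun x => x) false
  let n : Int := s.length
  let c : Int := PySem.Int.floordiv (n - 1) 2
  let left := (PySem.List.slice s none (some c)).reverse      -- s[:c][::-1]
  let right := PySem.List.slice s (some (c + 1)) none         -- s[c+1:]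
  let out := [PySem.List.pyGetD s c 0]                        -- [s[c]]; Python raises IndexError when s = [] (excluded by Pre_)
  let ab := if PySem.Int.mod n 2 == 1 then (left, right) else (right, left)
  let out := (ab.1.zip ab.2).foldl (fun acc p => acc ++ [p.1, p.2]) out
  out ++ PySem.List.slice ab.1 (some ((ab.2.length : Int))) none   -- a[len(b):]

-- ===== PRECONDITION & SPEC =====
-- Pre_ excludes only the empty list, on which both A and B raise IndexError.
def Pre_del_medians (nums : List Int) : Prop := nums ≠ []
instance (nums : List Int) : Decidable (Pre_del_medians nums) := by unfold Pre_del_medians; infer_instance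
def pvWitness_del_medians : List Int := [3, 1, 2]

def Spec_del_medians (nums : List Int) (out : List Int) : Prop := out = del_medians_alt nums
instance (nums : List Int) (out : List Int) : Decidable (Spec_del_medians nums out) := by unfold Spec_del_medians; infer_instance

-- ===== CLAIM (what is proved, stated in full; the proofs are below) =====
def Claim_equal_del_medians : Prop := ∀ (nums : List Int), Dom_del_medians nums → Pre_del_medians nums → Spec_del_medians nums (del_medians nums)

-- ===== LEMMAS AND PROOFS =====

def pvIlv : List Int → List Int → List Int
  | [], ys => ys
  | x :: xs, ys => x :: pvIlv ys xs
termination_by xs ys => xs.length + ys.length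

lemma pv_zipfold (b : List Int) : ∀ (a acc : List Int), b.length ≤ a.length → a.length ≤ b.length + 1 →
    ((a.zip b).foldl (fun acc p => acc ++ [p.1, p.2]) acc) ++ a.drop b.length = acc ++ pvIlv a b := by
  induction b with
  | nil =>
    intro a acc h1 h2
    match a, h2 with
    | [], _ => simp [pvIlv]
    | [x], _ => simp [pvIlv]
  | cons y b ih =>
    intro a acc h1 h2
    match a with
    | x :: a =>
      simp only [List.zip_cons_cons, List.foldl_cons, List.length_cons, List.drop_succ_cons]
      rw [ih a (acc ++ [x, y]) (by simpa using h1) (by simpa using h2)]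
      simp [pvIlv]

def pvSeq : Nat → List Int → List Int → Bool → List Int
  | 0, _, _, _ => []
  | Nat.succ k, L, R, odd =>
    if L.length + R.length ≤ 1 then []
    else if odd then R.headD 0 :: pvSeq k L R.tail false
    else L.getLastD 0 :: pvSeq k L.dropLast R true

lemma pv_rev_eq (L : List Int) (h : L ≠ []) : L.reverse = L.getLastD 0 :: L.dropLast.reverse := by
  conv_lhs => rw [← List.dropLast_concat_getLast h]
  simp [List.getLastD_eq_getLast?, List.getLast?_eq_some_getLast h]

lemma pv_seq_closed : ∀ (k : Nat) (L : List Int), L.length = k →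
    (∀ R : List Int, L.length = R.length → R ≠ [] →
      pvSeq (L.length + R.length) L R false ++ [R.getLastD 0] = pvIlv L.reverse R)
    ∧ (∀ R : List Int, R.length = L.length + 1 →
      pvSeq (L.length + R.length) L R true ++ [R.getLastD 0] = R.headD 0 :: pvIlv L.reverse R.tail) := by
  intro k
  induction k with
  | zero =>
    intro L hL
    have hLnil : L = [] := List.length_eq_zero_iff.mp hL
    subst hLnil
    constructor
    · intro R hlen hne; exact absurd (List.length_eq_zero_iff.mp hlen.symm) hne
    · intro R hlen
      match R, hlen with
      | [r], _ => simp [pvSeq, pvIlv]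
  | succ k ih =>
    intro L hL
    have hLne : L ≠ [] := by intro h; subst h; simp at hL
    have first : ∀ R : List Int, L.length = R.length → R ≠ [] →
        pvSeq (L.length + R.length) L R false ++ [R.getLastD 0] = pvIlv L.reverse R := by
      intro R hlen hne
      have hRlen : R.length = k + 1 := by omega
      have h1 : L.length + R.length = Nat.succ (k + R.length) := by omega
      rw [h1]
      simp only [pvSeq]
      have hgt : ¬ (L.length + R.length ≤ 1) := by omega
      simp only [if_neg hgt, if_neg (by simp : ¬ (false = true))]
      have hdl : L.dropLast.length = k := by simp [List.length_dropLast]; omega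
      have h2 : k + R.length = L.dropLast.length + R.length := by omega
      rw [List.cons_append, h2, (ih L.dropLast hdl).2 R (by omega)]
      rw [pv_rev_eq L hLne]
      have hRne : R ≠ [] := hne
      match R, hRne with
      | r :: R', _ => simp [pvIlv]
    refine ⟨first, ?_⟩
    intro R hlen
    have h1 : L.length + R.length = Nat.succ (L.length + R.length - 1) := by omega
    rw [h1]
    simp only [pvSeq]
    have hgt : ¬ (L.length + R.length ≤ 1) := by omega
    simp only [if_neg hgt]
    rw [if_pos (by simp)]
    have hRne : R ≠ [] := by intro h; subst h; simp at hlen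
    match R, hRne with
    | r :: R', _ =>
      have hlen' : R'.length + 1 = L.length + 1 := by simpa using hlen
      have hR'len : R'.length = k + 1 := by omega
      have hR' : R' ≠ [] := by
        intro h; rw [h] at hR'len; simp at hR'len
      have h2 : L.length + (r :: R').length - 1 = L.length + R'.length := by simp only [List.length_cons]; omega
      rw [List.cons_append, h2, show (r :: R').tail = R' from rfl]
      rw [show (r :: R').getLastD 0 = R'.getLastD 0 by
        cases R' with | nil => exact absurd rfl hR' | cons a l => simp [List.getLastD]]
      rw [first R' (by omega) hR']





lemma pv_erase_mid : ∀ (L R : List Int), (L ++ R).eraseIdx L.length = L ++ R.tail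
  | [], R => by cases R <;> simp
  | x :: L, R => by simp [pv_erase_mid L R]

lemma pv_erase_last : ∀ (L R : List Int), L ≠ [] → (L ++ R).eraseIdx (L.length - 1) = L.dropLast ++ R
  | [x], R, _ => by simp
  | x :: y :: L, R, _ => by
      have h := pv_erase_last (y :: L) R (by simp)
      simp only [List.length_cons, Nat.add_sub_cancel] at h ⊢
      simpa using h

lemma pv_getD_mid : ∀ (L R : List Int), (L ++ R).getD L.length 0 = R.headD 0
  | [], R => by cases R <;> simp
  | x :: L, R => by simpa using pv_getD_mid L R

lemma pv_getD_last : ∀ (L R : List Int), L ≠ [] → (L ++ R).getD (L.length - 1) 0 = L.getLastD 0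
  | [x], R, _ => by simp
  | x :: y :: L, R, _ => by
      have h := pv_getD_last (y :: L) R (by simp)
      simp only [List.length_cons, Nat.add_sub_cancel] at h ⊢
      simpa using h

lemma pv_set_mid : ∀ (done rest : List Int) (v : Int), (done ++ rest).set done.length v = done ++ rest.set 0 v
  | [], rest, v => by simp
  | x :: done, rest, v => by simp [pv_set_mid done rest v]

lemma pv_loopA_eq_seq : ∀ (k : Nat) (L R done : List Int) (odd : Bool),
    L.length + R.length = k → 1 ≤ k →
    (odd = true → R.length = L.length + 1) →
    (odd = false → L.length = R.length) →
    del_medians_loopA (L ++ R) (done ++ List.replicate k 0) done.length odd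
      = ([R.getLastD 0], done ++ (pvSeq k L R odd ++ [0])) := by
  intro k
  induction k with
  | zero => intro L R done odd h1 h2; omega
  | succ k ih =>
    intro L R done odd hk hk1 hodd heven
    by_cases hk0 : k = 0
    · -- total length 1: the loop exits immediately
      subst hk0
      have hof : odd = true := by
        cases odd
        · exact absurd (heven rfl) (by omega)
        · rfl
      subst hof
      have hL : L = [] := by
        have := hodd rfl; rw [List.eq_nil_iff_length_eq_zero]; omega
      subst hL
      match R, hodd rfl with
      | [r], _ =>
        rw [del_medians_loopA]
        simp [pvSeq]
    · have hlen : 1 < (L ++ R).length := by simp; omega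
      rw [del_medians_loopA]
      rw [dif_pos (by simpa using hlen)]
      cases odd
      · -- even length: pop the last element of L
        have hLR : L.length = R.length := heven rfl
        have hLne : L ≠ [] := by
          rw [List.ne_nil_iff_length_pos]; omega
        simp only [Bool.false_eq_true, reduceIte, Bool.not_false]
        have hidx : (L ++ R).length / 2 - 1 = L.length - 1 := by simp; omega
        rw [hidx, pv_erase_last L R hLne, pv_getD_last L R hLne]
        have hrep : List.replicate (k + 1) (0 : Int) = 0 :: List.replicate k 0 := rfl
        rw [hrep, pv_set_mid]
        have hstep : done ++ (0 :: List.replicate k 0).set 0 (L.getLastD 0)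
            = (done ++ [L.getLastD 0]) ++ List.replicate k 0 := by simp
        rw [hstep]
        have hdl : done.length + 1 = (done ++ [L.getLastD 0]).length := by simp
        rw [hdl, ih L.dropLast R (done ++ [L.getLastD 0]) true
          (by simp [List.length_dropLast]; omega) (by omega)
          (by intro _; simp [List.length_dropLast]; omega) (by intro h; cases h)]
        have hseq : pvSeq (k + 1) L R false = L.getLastD 0 :: pvSeq k L.dropLast R true := by
          rw [pvSeq]
          rw [if_neg (by omega), if_neg (by simp)]
        rw [hseq]
        simp
      · -- odd length: pop the head of R
        have hRL : R.length = L.length + 1 := hodd rfl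
        simp only [reduceIte, Bool.not_true]
        have hidx : (L ++ R).length / 2 = L.length := by simp; omega
        rw [hidx, pv_erase_mid L R, pv_getD_mid L R]
        have hrep : List.replicate (k + 1) (0 : Int) = 0 :: List.replicate k 0 := rfl
        rw [hrep, pv_set_mid]
        have hstep : done ++ (0 :: List.replicate k 0).set 0 (R.headD 0)
            = (done ++ [R.headD 0]) ++ List.replicate k 0 := by simp
        rw [hstep]
        have hdl : done.length + 1 = (done ++ [R.headD 0]).length := by simp
        rw [hdl, ih L R.tail (done ++ [R.headD 0]) false
          (by simp [List.length_tail]; omega) (by omega)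
          (by intro h; cases h) (by intro _; simp [List.length_tail]; omega)]
        have hRne2 : R.tail ≠ [] := by
          rw [List.ne_nil_iff_length_pos, List.length_tail]; omega
        have hgl : R.tail.getLastD 0 = R.getLastD 0 := by
          match R, hRne2 with
          | r :: R', h2 => cases R' with
            | nil => exact absurd rfl h2
            | cons a l => simp [List.getLastD]
        have hseq : pvSeq (k + 1) L R true = R.headD 0 :: pvSeq k L R.tail false := by
          rw [pvSeq]
          rw [if_neg (by omega), if_pos rfl]
        rw [hseq, hgl]
        simp

lemma pv_pySetD_last (ys : List Int) (v : Int) : PySem.List.pySetD (ys ++ [(0:Int)]) (-1) v = ys ++ [v] := by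
  simp [PySem.List.pySetD, PySem.List.pySet?, PySem.List.pyIdx?]

lemma pv_main (s : List Int) (hs : s ≠ []) :
    PySem.List.pySetD (del_medians_loopA s (List.replicate s.length 0) 0 (s.length % 2 == 1)).2 (-1)
      (PySem.List.pyGetD (del_medians_loopA s (List.replicate s.length 0) 0 (s.length % 2 == 1)).1 0 0)
    =
    (let n : Int := s.length
     let c : Int := PySem.Int.floordiv (n - 1) 2
     let left := (PySem.List.slice s none (some c)).reverse
     let right := PySem.List.slice s (some (c + 1)) none
     let out := [PySem.List.pyGetD s c 0]
     let ab := if PySem.Int.mod n 2 == 1 then (left, right) else (right, left)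
     let out := (ab.1.zip ab.2).foldl (fun acc p => acc ++ [p.1, p.2]) out
     out ++ PySem.List.slice ab.1 (some ((ab.2.length : Int))) none) := by
  have hm : 0 < s.length := List.length_pos_of_ne_nil hs
  have hsplit : s.take (s.length / 2) ++ s.drop (s.length / 2) = s := List.take_append_drop _ _
  have hLlen : (s.take (s.length / 2)).length = s.length / 2 := by
    rw [List.length_take]; omega
  have hRlen : (s.drop (s.length / 2)).length = s.length - s.length / 2 := by
    rw [List.length_drop]
  have hA := pv_loopA_eq_seq s.length (s.take (s.length / 2)) (s.drop (s.length / 2)) []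
    (s.length % 2 == 1) (by omega) (by omega)
    (by intro h; simp at h; omega) (by intro h; simp at h; omega)
  simp only [List.nil_append, List.length_nil] at hA
  rw [hsplit] at hA
  rw [hA, PySem.List.pyGetD_zero_cons, pv_pySetD_last]
  -- B side: name c
  have hc : PySem.Int.floordiv ((s.length : Int) - 1) 2 = (((s.length - 1) / 2 : Nat) : Int) := by
    rw [show ((s.length : Int) - 1) = (((s.length - 1 : Nat)) : Int) by omega]
    exact_mod_cast PySem.Int.floordiv_natCast (s.length - 1) 2
  have hmod : (PySem.Int.mod ((s.length : Nat) : Int) 2 == 1) = (s.length % 2 == 1) := by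
    rw [show ((2:Int)) = (((2:Nat)) : Int) by rfl, PySem.Int.mod_natCast]
    rcases Nat.mod_two_eq_zero_or_one s.length with h | h <;> simp [h]
  simp only [hc, hmod]
  rcases Nat.mod_two_eq_zero_or_one s.length with hpar | hpar
  · -- even length
    have hc2 : (s.length - 1) / 2 = s.length / 2 - 1 := by omega
    have hflag : (s.length % 2 == 1) = false := by simp [hpar]
    rw [hflag, hc2]
    simp only [if_neg (by simp : ¬ (false = true))]
    have hLne : s.take (s.length / 2) ≠ [] := by
      rw [List.ne_nil_iff_length_pos]; omega
    have hRne : s.drop (s.length / 2) ≠ [] := by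
      rw [List.ne_nil_iff_length_pos]; omega
    -- A side closed form
    have hclosed := (pv_seq_closed (s.length / 2) (s.take (s.length / 2)) hLlen).1
      (s.drop (s.length / 2)) (by omega) hRne
    rw [hLlen, hRlen] at hclosed
    rw [show s.length / 2 + (s.length - s.length / 2) = s.length by omega] at hclosed
    rw [hclosed]
    have hcast : ((s.length / 2 - 1 : Nat) : Int) + 1 = ((s.length / 2 : Nat) : Int) := by
      push_cast [show 1 ≤ s.length / 2 by omega]; ring
    rw [hcast]
    simp only [PySem.List.slice_from_natCast, PySem.List.slice_to_natCast, PySem.List.pyGetD_natCast]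
    have hgd : s.getD (s.length / 2 - 1) 0 = (s.take (s.length / 2)).getLastD 0 := by
      have h := pv_getD_last (s.take (s.length / 2)) (s.drop (s.length / 2)) hLne
      rw [hsplit, hLlen] at h
      exact h
    have hdL : s.take (s.length / 2 - 1) = (s.take (s.length / 2)).dropLast := by
      rw [List.dropLast_eq_take, hLlen, List.take_take]
      congr 1; omega
    rw [hgd, hdL]
    rw [pv_zipfold ((s.take (s.length / 2)).dropLast.reverse) (s.drop (s.length / 2))
      [(s.take (s.length / 2)).getLastD 0]
      (by simp [List.length_dropLast, hLlen, hRlen]; omega)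
      (by simp [List.length_dropLast, hLlen, hRlen]; omega)]
    rw [pv_rev_eq _ hLne]
    simp [pvIlv]
  · -- odd length
    have hc2 : (s.length - 1) / 2 = s.length / 2 := by omega
    have hflag : (s.length % 2 == 1) = true := by simp [hpar]
    rw [hflag, hc2]
    simp only [if_true]
    have hRne : s.drop (s.length / 2) ≠ [] := by
      rw [List.ne_nil_iff_length_pos]; omega
    have hclosed := (pv_seq_closed (s.length / 2) (s.take (s.length / 2)) hLlen).2
      (s.drop (s.length / 2)) (by omega)
    rw [hLlen, hRlen] at hclosed
    rw [show s.length / 2 + (s.length - s.length / 2) = s.length by omega] at hclosed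
    rw [hclosed]
    have hcast : ((s.length / 2 : Nat) : Int) + 1 = ((s.length / 2 + 1 : Nat) : Int) := by
      push_cast; ring
    rw [hcast]
    simp only [PySem.List.slice_from_natCast, PySem.List.slice_to_natCast, PySem.List.pyGetD_natCast]
    have hgd : s.getD (s.length / 2) 0 = (s.drop (s.length / 2)).headD 0 := by
      rw [List.getD_eq_getElem?_getD, List.headD_eq_head?, List.head?_drop]
    have hdrop : s.drop (s.length / 2 + 1) = (s.drop (s.length / 2)).tail := by
      rw [List.tail_drop]
    rw [hgd, hdrop]
    rw [pv_zipfold ((s.drop (s.length / 2)).tail) ((s.take (s.length / 2)).reverse)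
      [(s.drop (s.length / 2)).headD 0]
      (by simp [hLlen]; omega)
      (by simp [hLlen]; omega)]
    simp

-- ===== VERDICT (by name: the statement is the Claim_ definition above) =====
theorem del_medians_spec : Claim_equal_del_medians := by
  intro nums _ hpre
  unfold Spec_del_medians
  have hs : PySem.List.sorted nums (fun x => x) false ≠ [] := by
    intro h
    have hp := PySem.List.sorted_perm nums (fun x => x) false
    rw [h] at hp
    exact hpre (hp.symm.eq_nil)
  exact pv_main _ hs
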